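-- pv_equiv track=rewrite | github.com/unifyai/unity | unity/task_scheduler/machine_state.py | _normalize_run_key_component
-- ===== SOURCE A (Python) =====
-- from typing import Any, Mapping
--
-- def _normalize_run_key_component(value: str | None) -> str | None:
--     """Normalize one free-form run-key component into a compact identifier."""
--
--     text = _coerce_str(value)
--     if not text:
--         return None
--     normalized_chars = [
--         char.lower() if char.isalnum() else "-" for char in text.strip()
--     ]
--     normalized = "".join(normalized_chars).strip("-")
--     while "--" in normalized:
--         normalized = normalized.replace("--", "-")
--     return normalized or None
--
-- def _coerce_str(value: Any) -> str | None:
--     """Normalize scalar values to strings while preserving `None`."""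
--
--     if value is None:
--         return None
--     text = str(value)
--     return text if text else None
-- ===== SOURCE B (Python) =====
-- def _normalize_run_key_component(value):
--     """Normalize one free-form run-key component into a compact identifier.
--
--     Single left-to-right pass: emit lowercased alphanumerics, emit a dash only
--     when the previous emitted character is not a dash (and not at the start),
--     and drop at most one trailing dash at the end.
--     """
--     if value is None:
--         return None
--     text = str(value)
--     if not text:
--         return None
--     out = []
--     for ch in text.strip():
--         if ch.isalnum():
--             out.append(ch.lower())
--         elif out and out[-1] != "-":
--             out.append("-")
--     if out and out[-1] == "-":
--         out.pop()
--     return "".join(out) or None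
-- ===== Notes on version B (the rewrite author's own statement) =====
-- stated objective: alternative
-- what changed: Replaced A's map-join followed by a dash-strip and repeated whole-string double-dash replace passes with a single left-to-right pass that emits a dash only after a non-dash character and pops at most one trailing dash.
import Mathlib
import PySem

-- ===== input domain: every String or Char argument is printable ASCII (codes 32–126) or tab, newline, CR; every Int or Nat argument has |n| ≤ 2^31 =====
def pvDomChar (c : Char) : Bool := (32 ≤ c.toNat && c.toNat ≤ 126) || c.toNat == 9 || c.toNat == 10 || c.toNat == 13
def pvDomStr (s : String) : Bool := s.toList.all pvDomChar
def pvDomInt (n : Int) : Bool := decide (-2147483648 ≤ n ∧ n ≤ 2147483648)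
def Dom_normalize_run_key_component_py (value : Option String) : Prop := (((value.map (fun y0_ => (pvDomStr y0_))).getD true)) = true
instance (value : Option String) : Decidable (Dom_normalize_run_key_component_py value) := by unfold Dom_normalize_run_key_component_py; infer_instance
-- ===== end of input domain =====

-- B replaces A's map+join, strip('-') and repeated replace('--','-') passes by one
-- left-to-right pass that emits a dash only after a non-dash and drops one trailing dash.

-- ===== PORT A =====
-- A-side helpers: `replAll` is one pass of Python's str.replace('--','-') (all
-- non-overlapping occurrences, left to right); it is needed to prove that each
-- iteration of A's `while "--" in normalized` loop shortens the string, which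
-- justifies the termination of `dashLoopA` below.
def replAll : List Char → List Char
  | [] => []
  | [c] => [c]
  | c :: d :: t => if c = '-' ∧ d = '-' then '-' :: replAll t else c :: replAll (d :: t)

theorem replAll_length_le (s : List Char) : (replAll s).length ≤ s.length := by
  fun_induction replAll <;> simp_all <;> omega

theorem replAll_length_lt (s : List Char) (h : ['-','-'] <:+: s) :
    (replAll s).length < s.length := by
  fun_induction replAll with
  | case1 => simp at h
  | case2 c =>
    obtain ⟨u, v, huv⟩ := h
    have : (u ++ ['-','-'] ++ v).length = 1 := by rw [huv]; rfl
    simp at this; omega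
  | case3 c d t hcd ih =>
    have := replAll_length_le t; simp [replAll, hcd]; omega
  | case4 c d t hcd ih =>
    have hdt : ['-','-'] <:+: (d :: t) := by
      rcases h with ⟨u, v, huv⟩
      cases u with
      | nil =>
        simp at huv
        exact absurd ⟨huv.1.symm, huv.2.1.symm⟩ hcd
      | cons a u' =>
        rw [List.cons_append, List.cons_append] at huv
        injection huv with h1 h2
        exact ⟨u', v, by simpa using h2⟩
    have h1 := ih hdt
    simp only [List.length_cons] at *; omega

theorem go_eq (fuel : Nat) : ∀ (l acc : List Char), l.length ≤ fuel →
    PySem.Chars.replace.go ['-','-'] ['-'] fuel l acc = acc.reverse ++ replAll l := by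
  induction fuel with
  | zero => intro l acc h; simp at h; simp [h, PySem.Chars.replace.go, replAll]
  | succ n ih =>
    intro l acc h
    match l with
    | [] => simp [PySem.Chars.replace.go, replAll]
    | [c] =>
      rw [PySem.Chars.replace.go]
      have : List.isPrefixOf ['-','-'] [c] = false := by simp [List.isPrefixOf]
      simp only [this, Bool.false_eq_true, if_neg, ite_false]
      rw [ih [] (c :: acc) (by simp)]
      simp [replAll]
    | c :: d :: t =>
      rw [PySem.Chars.replace.go]
      by_cases hcd : c = '-' ∧ d = '-'
      · have hp : List.isPrefixOf ['-','-'] (c :: d :: t) = true := by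
          simp [List.isPrefixOf, hcd.1, hcd.2]
        simp only [hp, if_true]
        rw [show List.drop (['-','-'] : List Char).length (c :: d :: t) = t by simp]
        rw [ih t _ (by simp at h ⊢; omega)]
        simp [replAll, hcd]
      · have hp : List.isPrefixOf ['-','-'] (c :: d :: t) = false := by
          simp [List.isPrefixOf]; tauto
        simp only [hp, Bool.false_eq_true, if_neg, ite_false]
        rw [ih (d :: t) _ (by simp at h ⊢; omega)]
        simp [replAll, hcd]

theorem replace_dashes_eq (s : List Char) :
    PySem.Chars.replace s ['-','-'] ['-'] = replAll s := by
  rw [PySem.Chars.replace]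
  simp only [List.isEmpty, if_neg]
  exact go_eq s.length s [] le_rfl

theorem replace_dashes_length_lt (s : List Char)
    (h : PySem.Chars.isIn ['-','-'] s = true) :
    (PySem.Chars.replace s ['-','-'] ['-']).length < s.length := by
  rw [replace_dashes_eq]
  exact replAll_length_lt s ((PySem.Chars.isIn_iff_infix _ _).mp h)

def dashLoopA (s : List Char) : List Char :=
  if h : PySem.Chars.isIn ['-','-'] s = true then
    dashLoopA (PySem.Chars.replace s ['-','-'] ['-'])
  else s
termination_by s.length
decreasing_by exact replace_dashes_length_lt s h

def coerce_str_py (value : Option String) : Option String :=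
  match value with
  | none => none
  | some s => if s.toList.isEmpty then none else some s

def normalize_run_key_component_py (value : Option String) : Option String :=
  match coerce_str_py value with
  | none => none
  | some s =>
    let normalized_chars : List Char :=
      (PySem.Chars.strip s.toList).map
        (fun ch => if PySem.Chars.isalnum ch then PySem.Chars.lowerChar ch else '-')
    let normalized := PySem.Chars.stripChars normalized_chars ['-']
    let normalized := dashLoopA normalized
    if normalized.isEmpty then none else some (String.ofList normalized)

def normalize_run_key_component_py_alt (value : Option String) : Option String :=
  match value with
  | none => none
  | some s =>
    if s.toList.isEmpty then none
    else
      let out : List Char :=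
        (PySem.Chars.strip s.toList).foldl
          (fun out ch =>
            if PySem.Chars.isalnum ch then out ++ [PySem.Chars.lowerChar ch]
            else if out ≠ [] ∧ out.getLast? ≠ some '-' then out ++ ['-']
            else out) []
      let out := if out ≠ [] ∧ out.getLast? = some '-' then out.dropLast else out
      if out.isEmpty then none else some (String.ofList out)

-- ===== PRECONDITION & SPEC =====
def Spec_normalize_run_key_component_py (value : Option String) (out : Option String) : Prop := out = normalize_run_key_component_py_alt value
instance (value : Option String) (out : Option String) : Decidable (Spec_normalize_run_key_component_py value out) := by unfold Spec_normalize_run_key_component_py; infer_instance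

-- ===== CLAIM =====
def Claim_equal_normalize_run_key_component_py : Prop := ∀ (value : Option String), Dom_normalize_run_key_component_py value → Spec_normalize_run_key_component_py value (normalize_run_key_component_py value)

-- ===== LEMMAS AND PROOFS =====
-- `collapse2` collapses every run of dashes to a single dash (right to left);
-- both ports' dash handling is reduced to it.
def cstep (c : Char) (z : List Char) : List Char :=
  if c = '-' ∧ z.head? = some '-' then z else c :: z

def collapse2 (s : List Char) : List Char := s.foldr cstep []

theorem collapse2_cons (c : Char) (t : List Char) :
    collapse2 (c :: t) = cstep c (collapse2 t) := rfl

theorem head?_collapse2 (y : List Char) : (collapse2 y).head? = y.head? := by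
  cases y with
  | nil => rfl
  | cons c t =>
    rw [collapse2_cons, cstep]
    split_ifs with h
    · rw [h.2]; simp [h.1]
    · rfl

theorem collapse2_ne_nil (c : Char) (t : List Char) : collapse2 (c :: t) ≠ [] := by
  intro h
  have := head?_collapse2 (c :: t)
  rw [h] at this; simp at this

theorem cstep_dash_idem (z : List Char) : cstep '-' (cstep '-' z) = cstep '-' z := by
  by_cases h : z.head? = some '-'
  · simp [cstep, h]
  · simp [cstep, h]

theorem collapse2_replAll (s : List Char) : collapse2 (replAll s) = collapse2 s := by
  fun_induction replAll with
  | case1 => rfl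
  | case2 c => rfl
  | case3 c d t hcd ih =>
    simp only [replAll, if_pos hcd, hcd.1, hcd.2, collapse2_cons, ih, cstep_dash_idem]
  | case4 c d t hcd ih =>
    simp only [replAll, if_neg hcd, collapse2_cons, ih]

theorem collapse2_no_ddash (s : List Char) (h : ¬ (['-','-'] <:+: s)) :
    collapse2 s = s := by
  induction s with
  | nil => rfl
  | cons c t ih =>
    have ht : ¬ (['-','-'] <:+: t) := fun hh => h (hh.trans (List.suffix_cons c t).isInfix)
    rw [collapse2_cons, ih ht, cstep]
    split_ifs with hp
    · exfalso
      apply h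
      cases t with
      | nil => simp at hp
      | cons d t' =>
        simp at hp
        exact ⟨[], t', by simp [hp.1, hp.2]⟩
    · rfl

theorem dashLoopA_eq (s : List Char) : dashLoopA s = collapse2 s := by
  fun_induction dashLoopA with
  | case1 s h ih => rw [ih, replace_dashes_eq, collapse2_replAll]
  | case2 s h =>
    rw [collapse2_no_ddash]
    intro hi
    exact h ((PySem.Chars.isIn_iff_infix _ _).mpr hi)

theorem collapse2_dash (t : List Char) :
    collapse2 ('-' :: t) = '-' :: collapse2 (t.dropWhile (· == '-')) := by
  induction t with
  | nil => rfl
  | cons c t' ih =>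
    by_cases hc : c = '-'
    · subst hc
      rw [collapse2_cons, cstep, if_pos ⟨rfl, by rw [head?_collapse2]; rfl⟩, ih]
      simp
    · rw [collapse2_cons ('-'), cstep,
        if_neg (by rw [head?_collapse2]; simp [hc]), List.dropWhile_cons_of_neg (by simp [hc])]

theorem collapse2_snoc (x : List Char) (a : Char) :
    collapse2 (x ++ [a]) =
      if a = '-' ∧ x.getLast? = some '-' then collapse2 x else collapse2 x ++ [a] := by
  induction x with
  | nil => simp [collapse2, cstep]
  | cons c t ih =>
    rw [List.cons_append, collapse2_cons, ih, collapse2_cons]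
    cases t with
    | nil =>
      simp only [collapse2, List.foldr_nil, List.getLast?_nil, List.getLast?_singleton]
      by_cases hac : a = '-' ∧ c = '-'
      · simp [cstep, hac.1, hac.2]
      · rw [if_neg (by simpa using hac)]
        simp only [cstep]
        rw [if_neg (by intro hh; exact hac ⟨by simpa using hh.2, hh.1⟩)]
        simp [cstep]
        tauto
    | cons d t' =>
      rw [List.getLast?_cons_cons]
      have hd : (collapse2 (d :: t')).head? = some d := by rw [head?_collapse2]; rfl
      split_ifs with h
      · rfl
      · rw [cstep, cstep]
        have hd2 : (collapse2 (d :: t') ++ [a]).head? = some d := by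
          cases hcc : collapse2 (d :: t') with
          | nil => exact absurd hcc (collapse2_ne_nil d t')
          | cons e r => rw [hcc] at hd; simpa using hd
        rw [hd2, hd]
        split_ifs with h2
        · rfl
        · simp

theorem collapse2_reverse (x : List Char) :
    collapse2 x.reverse = (collapse2 x).reverse := by
  induction x with
  | nil => rfl
  | cons c t ih =>
    rw [List.reverse_cons, collapse2_snoc, collapse2_cons, cstep, ih,
      List.getLast?_reverse, head?_collapse2]
    split_ifs with h1
    · rfl
    · simp

theorem lower_ne_dash (c : Char) (h : PySem.Chars.isalnum c = true) :
    PySem.Chars.lowerChar c ≠ '-' := by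
  rw [PySem.Chars.lowerChar]
  split_ifs with hu
  · rw [PySem.Chars.isupper] at hu
    simp only [Bool.and_eq_true, decide_eq_true_eq] at hu
    have hA : 65 ≤ c.toNat := hu.1
    have hZ : c.toNat ≤ 90 := hu.2
    intro hc
    have h2 : (Char.ofNat (c.toNat + 32)).toNat = ('-' : Char).toNat := by rw [hc]
    rw [Char.ofNat, dif_pos (Or.inl (by omega : c.toNat + 32 < 55296))] at h2
    have h3 : c.toNat + 32 = 45 := h2
    omega
  · intro hc
    subst hc
    exact absurd h (by decide)

-- single-pass state machine: pd = "output is empty or ends with a dash"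
def spass (pd : Bool) : List Char → List Char
  | [] => []
  | ch :: t =>
    if PySem.Chars.isalnum ch then PySem.Chars.lowerChar ch :: spass false t
    else if pd then spass pd t
    else '-' :: spass true t

def consStep (racc : List Char) (ch : Char) : List Char :=
  if PySem.Chars.isalnum ch then PySem.Chars.lowerChar ch :: racc
  else if racc ≠ [] ∧ racc.head? ≠ some '-' then '-' :: racc
  else racc

def snocStep (out : List Char) (ch : Char) : List Char :=
  if PySem.Chars.isalnum ch then out ++ [PySem.Chars.lowerChar ch]
  else if out ≠ [] ∧ out.getLast? ≠ some '-' then out ++ ['-']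
  else out

theorem snocStep_eq (out : List Char) (ch : Char) :
    snocStep out ch = (consStep out.reverse ch).reverse := by
  rw [snocStep, consStep]
  split_ifs with h1 h2 h3 h3 <;> simp_all

theorem foldl_snocStep (m : List Char) : ∀ (acc : List Char),
    m.foldl snocStep acc = (m.foldl consStep acc.reverse).reverse := by
  induction m with
  | nil => simp
  | cons ch t ih =>
    intro acc
    rw [List.foldl_cons, List.foldl_cons, ih, snocStep_eq, List.reverse_reverse]

theorem foldl_consStep (m : List Char) : ∀ (racc : List Char) (pd : Bool),
    (pd = true ↔ (racc = [] ∨ racc.head? = some '-')) →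
    m.foldl consStep racc = (spass pd m).reverse ++ racc := by
  induction m with
  | nil => intro racc pd _; simp [spass]
  | cons ch t ih =>
    intro racc pd hpd
    rw [List.foldl_cons]
    by_cases ha : PySem.Chars.isalnum ch = true
    · rw [show consStep racc ch = PySem.Chars.lowerChar ch :: racc by rw [consStep, if_pos ha]]
      rw [ih _ false (by simp [lower_ne_dash ch ha])]
      simp [spass, ha]
    · by_cases hpd' : pd = true
      · have hr := hpd.mp hpd'
        rw [show consStep racc ch = racc by
          rw [consStep, if_neg ha, if_neg (by rcases hr with h | h <;> simp [h])]]
        rw [ih _ pd hpd]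
        simp [spass, ha, hpd']
      · have hr : ¬(racc = [] ∨ racc.head? = some '-') := fun h => hpd' (hpd.mpr h)
        push_neg at hr
        rw [show consStep racc ch = '-' :: racc by
          rw [consStep, if_neg ha, if_pos ⟨hr.1, hr.2⟩]]
        rw [ih _ true (by simp)]
        simp only [spass, ha, Bool.false_eq_true, if_neg, ite_false,
          eq_false_of_ne_true hpd']
        simp [hpd']

def fmap (ch : Char) : Char :=
  if PySem.Chars.isalnum ch then PySem.Chars.lowerChar ch else '-'

theorem spass_spec (m : List Char) :
    spass false m = collapse2 (m.map fmap) ∧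
    spass true m = collapse2 ((m.map fmap).dropWhile (· == '-')) := by
  induction m with
  | nil => exact ⟨rfl, rfl⟩
  | cons ch t ih =>
    by_cases ha : PySem.Chars.isalnum ch = true
    · have hne : fmap ch ≠ '-' := by rw [fmap, if_pos ha]; exact lower_ne_dash ch ha
      have hf : fmap ch = PySem.Chars.lowerChar ch := by rw [fmap, if_pos ha]
      constructor
      · rw [List.map_cons, collapse2_cons, cstep,
          if_neg (by rw [hf]; intro hh; exact lower_ne_dash ch ha hh.1)]
        rw [spass, if_pos ha, ih.1, hf]
      · rw [List.map_cons, List.dropWhile_cons_of_neg (by simpa using hne),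
          collapse2_cons, cstep,
          if_neg (by rw [hf]; intro hh; exact lower_ne_dash ch ha hh.1)]
        rw [spass, if_pos ha, ih.1, hf]
    · have hf : fmap ch = '-' := by rw [fmap, if_neg ha]
      constructor
      · rw [List.map_cons, hf, collapse2_dash]
        rw [spass, if_neg ha, if_neg (by simp), ih.2]
      · rw [List.map_cons, hf, List.dropWhile_cons_of_pos (by simp)]
        rw [spass, if_neg ha, if_pos rfl, ih.2]

theorem getLast?_collapse2 (z : List Char) : (collapse2 z).getLast? = z.getLast? := by
  rw [← List.head?_reverse, ← collapse2_reverse, head?_collapse2, List.head?_reverse]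

theorem collapse2_dropDash (y : List Char) :
    collapse2 (y.dropWhile (· == '-')) =
      if y.head? = some '-' then (collapse2 y).tail else collapse2 y := by
  cases y with
  | nil => rfl
  | cons c t =>
    by_cases hc : c = '-'
    · subst hc
      rw [List.dropWhile_cons_of_pos (by simp), if_pos (by rfl), collapse2_dash]
      rfl
    · rw [List.dropWhile_cons_of_neg (by simp [hc]), if_neg (by simp [hc])]

theorem contains_dash (c : Char) : (List.contains ['-'] c) = (c == '-') := by
  simp [BEq.beq]

theorem main_list_eq (m : List Char) :
    dashLoopA (PySem.Chars.stripChars (m.map fmap) ['-']) =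
      (if (spass true m).getLast? = some '-' then (spass true m).dropLast
       else spass true m) := by
  have hfun : (fun c => (['-'] : List Char).contains c) = (fun c => c == '-') := by
    funext c; exact contains_dash c
  rw [PySem.Chars.stripChars]
  simp only [hfun]
  set z := (m.map fmap).dropWhile (· == '-') with hz
  rw [dashLoopA_eq, collapse2_reverse, collapse2_dropDash]
  have hsp : spass true m = collapse2 z := (spass_spec m).2
  rw [List.head?_reverse, hsp, getLast?_collapse2]
  split_ifs with h
  · rw [collapse2_reverse, List.tail_reverse, List.reverse_reverse]
  · rw [collapse2_reverse, List.reverse_reverse]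

theorem ports_agree (value : Option String) :
    normalize_run_key_component_py value = normalize_run_key_component_py_alt value := by
  cases value with
  | none => rfl
  | some s =>
    rw [normalize_run_key_component_py, normalize_run_key_component_py_alt, coerce_str_py]
    by_cases he : s.toList.isEmpty
    · simp [he]
    · simp only [he, Bool.false_eq_true, ite_false]
      set m := PySem.Chars.strip s.toList with hm
      have hmap : (m.map (fun ch => if PySem.Chars.isalnum ch then PySem.Chars.lowerChar ch else '-')) = m.map fmap := by
        simp [fmap]
      have hfold : (m.foldl
          (fun out ch =>
            if PySem.Chars.isalnum ch then out ++ [PySem.Chars.lowerChar ch]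
            else if out ≠ [] ∧ out.getLast? ≠ some '-' then out ++ ['-']
            else out) []) = spass true m := by
        rw [show (fun out ch =>
            if PySem.Chars.isalnum ch then out ++ [PySem.Chars.lowerChar ch]
            else if out ≠ [] ∧ out.getLast? ≠ some '-' then out ++ ['-']
            else out) = snocStep from rfl]
        rw [foldl_snocStep, show ([] : List Char).reverse = [] from rfl,
          foldl_consStep m [] true (by simp), List.append_nil, List.reverse_reverse]
      simp only [hmap, hfold, main_list_eq]
      have hif : (if (spass true m) ≠ [] ∧ (spass true m).getLast? = some '-'
            then (spass true m).dropLast else spass true m) =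
          (if (spass true m).getLast? = some '-' then (spass true m).dropLast
            else spass true m) := by
        split_ifs with h1 h2 h2
        · rfl
        · exact absurd h1.2 h2
        · exact absurd ⟨fun hn => by rw [hn] at h2; simp at h2, h2⟩ h1
        · rfl
      rw [hif]

-- ===== VERDICT =====
theorem normalize_run_key_component_py_spec : Claim_equal_normalize_run_key_component_py := by
  intro value _
  unfold Spec_normalize_run_key_component_py
  exact ports_agree value
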